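-- pv_equiv track=rewrite | github.com/gotchabuggs/Splicing-Agent-Rotation | code/splicing-agent/test.py | _map_cds_offset_to_tx_coord
-- ===== SOURCE A (Python) =====
-- from typing import Any, Dict, List, Optional, Tuple, TypedDict, Callable
--
-- def _map_cds_offset_to_tx_coord(cds_segments: List[Tuple[int, int]], cds_offset_0based: int) -> int:
--     remaining = int(cds_offset_0based)
--     for a, b in cds_segments:
--         seg_len = int(b) - int(a) + 1
--         if remaining < seg_len:
--             return int(a) + remaining
--         remaining -= seg_len
--     raise ValueError("CDS offset exceeds CDS length")
-- ===== SOURCE B (Python) =====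
-- from typing import List, Tuple
--
-- def _map_cds_offset_to_tx_coord(cds_segments: List[Tuple[int, int]], cds_offset_0based: int) -> int:
--     off = int(cds_offset_0based)
--     # cumulative-length table: cum[k] = total length of the first k segments
--     cum = [0]
--     for a, b in cds_segments:
--         cum.append(cum[-1] + (int(b) - int(a) + 1))
--     for i in range(len(cds_segments)):
--         if off < cum[i + 1]:
--             return int(cds_segments[i][0]) + (off - cum[i])
--     raise ValueError("CDS offset exceeds CDS length")
-- ===== Notes on version B (the rewrite author's own statement) =====
-- stated objective: alternative
-- what changed: replaces the running-remainder subtract-as-you-scan loop with building a cumulative-length table once and then locating the containing segment by comparing the raw offset against the table, computing the coordinate from the prefix sums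
import Mathlib
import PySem

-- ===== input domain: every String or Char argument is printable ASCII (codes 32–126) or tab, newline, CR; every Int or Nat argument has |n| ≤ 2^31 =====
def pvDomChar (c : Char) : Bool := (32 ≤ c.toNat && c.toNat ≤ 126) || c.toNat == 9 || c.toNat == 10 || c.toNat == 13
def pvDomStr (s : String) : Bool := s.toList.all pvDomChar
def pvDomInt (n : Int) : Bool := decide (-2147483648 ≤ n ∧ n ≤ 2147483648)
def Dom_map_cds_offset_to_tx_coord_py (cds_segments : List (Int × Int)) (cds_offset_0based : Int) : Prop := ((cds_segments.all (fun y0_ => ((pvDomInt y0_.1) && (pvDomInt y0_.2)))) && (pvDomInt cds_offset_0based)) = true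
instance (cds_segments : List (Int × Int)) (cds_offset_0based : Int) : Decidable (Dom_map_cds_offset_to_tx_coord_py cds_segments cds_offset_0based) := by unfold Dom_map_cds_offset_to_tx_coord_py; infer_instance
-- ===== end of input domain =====

-- B replaces A's running-remainder scan with a cumulative-length table searched by index (alternative decomposition, same cost).

-- ===== PORT A =====
-- the for-loop of A, carrying `remaining`; the final `raise ValueError` is the
-- [] case (excluded by Pre_), where the port returns 0
def pvLoopA : List (Int × Int) → Int → Int
  | [], _ => 0
  | (a, b) :: rest, remaining =>
    let seg_len := b - a + 1
    if remaining < seg_len then a + remaining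
    else pvLoopA rest (remaining - seg_len)

def map_cds_offset_to_tx_coord_py (cds_segments : List (Int × Int)) (cds_offset_0based : Int) : Int :=
  pvLoopA cds_segments cds_offset_0based

-- ===== PORT B =====
-- first loop of Source B: cum.append(cum[-1] + (b - a + 1)); cum is always nonempty, so cum[-1] = getLastD
def pvBuildCum : List (Int × Int) → List Int → List Int
  | [], cum => cum
  | (a, b) :: rest, cum => pvBuildCum rest (cum ++ [cum.getLastD 0 + (b - a + 1)])

-- second loop of Source B over `range(len(cds_segments))`; the final `raise ValueError`
-- is the [] case (excluded by Pre_), where the port returns 0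
def pvSearchB (segs : List (Int × Int)) (cum : List Int) (off : Int) : List Nat → Int
  | [] => 0
  | i :: is =>
    if off < cum.getD (i + 1) 0 then (segs.getD i (0, 0)).1 + (off - cum.getD i 0)
    else pvSearchB segs cum off is

def map_cds_offset_to_tx_coord_py_alt (cds_segments : List (Int × Int)) (cds_offset_0based : Int) : Int :=
  let cum := pvBuildCum cds_segments [0]
  pvSearchB cds_segments cum cds_offset_0based (List.range cds_segments.length)

-- ===== PRECONDITION & SPEC =====
-- total length of the first k segments (used only by Pre_)
def pvCumLen (segs : List (Int × Int)) (k : Nat) : Int :=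
  (((segs.take k).map (fun p => p.2 - p.1 + 1)).sum)

-- exactly the inputs on which the Python A returns (no ValueError): the offset is
-- strictly below the cumulative length of some prefix of the segments
def Pre_map_cds_offset_to_tx_coord_py (cds_segments : List (Int × Int)) (cds_offset_0based : Int) : Prop :=
  ∃ i, i < cds_segments.length ∧ cds_offset_0based < pvCumLen cds_segments (i + 1)
instance (cds_segments : List (Int × Int)) (cds_offset_0based : Int) : Decidable (Pre_map_cds_offset_to_tx_coord_py cds_segments cds_offset_0based) := by unfold Pre_map_cds_offset_to_tx_coord_py; infer_instance

def pvWitness_map_cds_offset_to_tx_coord_py : (List (Int × Int)) × Int := ([(10, 12), (20, 25)], 4)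

def Spec_map_cds_offset_to_tx_coord_py (cds_segments : List (Int × Int)) (cds_offset_0based : Int) (out : Int) : Prop := out = map_cds_offset_to_tx_coord_py_alt cds_segments cds_offset_0based
instance (cds_segments : List (Int × Int)) (cds_offset_0based : Int) (out : Int) : Decidable (Spec_map_cds_offset_to_tx_coord_py cds_segments cds_offset_0based out) := by unfold Spec_map_cds_offset_to_tx_coord_py; infer_instance

-- ===== CLAIM (what is proved, stated in full; the proofs are below) =====
def Claim_equal_map_cds_offset_to_tx_coord_py : Prop := ∀ (cds_segments : List (Int × Int)) (cds_offset_0based : Int), Dom_map_cds_offset_to_tx_coord_py cds_segments cds_offset_0based → Pre_map_cds_offset_to_tx_coord_py cds_segments cds_offset_0based → Spec_map_cds_offset_to_tx_coord_py cds_segments cds_offset_0based (map_cds_offset_to_tx_coord_py cds_segments cds_offset_0based)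

-- ===== LEMMAS AND PROOFS =====

-- reference cumulative list: cumFrom t segs = [t, t+L0, t+L0+L1, …]
def cumFrom (t : Int) : List (Int × Int) → List Int
  | [] => [t]
  | (a, b) :: rest => t :: cumFrom (t + (b - a + 1)) rest

theorem pvBuildCum_eq (segs : List (Int × Int)) :
    ∀ (c : List Int) (t : Int), pvBuildCum segs (c ++ [t]) = c ++ cumFrom t segs := by
  induction segs with
  | nil => intro c t; simp [pvBuildCum, cumFrom]
  | cons p rest ih =>
    intro c t
    obtain ⟨a, b⟩ := p
    have h1 : (c ++ [t]).getLastD 0 = t := by simp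
    simp only [pvBuildCum, cumFrom, h1]
    have := ih (c ++ [t]) (t + (b - a + 1))
    simpa using this

theorem pvBuildCum_nil_eq (segs : List (Int × Int)) : pvBuildCum segs [0] = cumFrom 0 segs := by
  have := pvBuildCum_eq segs [] 0
  simpa using this

theorem cumFrom_getD (segs : List (Int × Int)) :
    ∀ (t : Int) (i : Nat), i ≤ segs.length →
      (cumFrom t segs).getD i 0 = t + pvCumLen segs i := by
  induction segs with
  | nil =>
    intro t i hi
    have : i = 0 := by simpa using hi
    subst this
    simp [cumFrom, pvCumLen]
  | cons p rest ih =>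
    intro t i hi
    obtain ⟨a, b⟩ := p
    cases i with
    | zero => simp [cumFrom, pvCumLen]
    | succ j =>
      simp only [cumFrom, List.getD_cons_succ]
      rw [ih (t + (b - a + 1)) j (by simpa using hi)]
      simp [pvCumLen]
      ring

theorem pvSearchB_shift (a b : Int) (rest : List (Int × Int)) (off : Int) :
    ∀ (l : List Nat), (∀ i ∈ l, i < rest.length) →
      pvSearchB ((a, b) :: rest) (cumFrom 0 ((a, b) :: rest)) off (l.map Nat.succ)
        = pvSearchB rest (cumFrom 0 rest) (off - (b - a + 1)) l := by
  intro l hl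
  induction l with
  | nil => simp [pvSearchB]
  | cons i is ih =>
    have hi : i < rest.length := hl i (by simp)
    have hc1 : (cumFrom 0 ((a, b) :: rest)).getD (i + 1 + 1) 0
        = (b - a + 1) + ((cumFrom 0 rest).getD (i + 1) 0) := by
      simp only [cumFrom, List.getD_cons_succ]
      rw [cumFrom_getD rest (0 + (b - a + 1)) (i + 1) (by omega),
          cumFrom_getD rest 0 (i + 1) (by omega)]
      ring
    have hc0 : (cumFrom 0 ((a, b) :: rest)).getD (i + 1) 0
        = (b - a + 1) + ((cumFrom 0 rest).getD i 0) := by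
      simp only [cumFrom, List.getD_cons_succ]
      rw [cumFrom_getD rest (0 + (b - a + 1)) i (by omega),
          cumFrom_getD rest 0 i (by omega)]
      ring
    simp only [List.map_cons, pvSearchB, hc1, hc0]
    have hcond : (off < (b - a + 1) + ((cumFrom 0 rest).getD (i + 1) 0))
        ↔ (off - (b - a + 1) < (cumFrom 0 rest).getD (i + 1) 0) := by omega
    by_cases h : off - (b - a + 1) < (cumFrom 0 rest).getD (i + 1) 0
    · rw [if_pos (hcond.mpr h), if_pos h]
      simp only [List.getD_cons_succ]
      ring
    · rw [if_neg (fun hh => h (hcond.mp hh)), if_neg h]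
      exact ih (fun j hj => hl j (by simp [hj]))

theorem cumFrom_getD_one (a b : Int) (rest : List (Int × Int)) :
    (cumFrom 0 ((a, b) :: rest)).getD 1 0 = b - a + 1 := by
  simp only [cumFrom, List.getD_cons_succ]
  rw [cumFrom_getD rest (0 + (b - a + 1)) 0 (by omega)]
  simp [pvCumLen]

theorem B_eq_A (segs : List (Int × Int)) :
    ∀ off : Int, pvSearchB segs (cumFrom 0 segs) off (List.range segs.length) = pvLoopA segs off := by
  induction segs with
  | nil => intro off; simp [pvSearchB, pvLoopA]
  | cons p rest ih =>
    intro off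
    obtain ⟨a, b⟩ := p
    rw [List.length_cons, List.range_succ_eq_map]
    simp only [pvSearchB, pvLoopA]
    rw [cumFrom_getD_one]
    by_cases h : off < b - a + 1
    · rw [if_pos h, if_pos h]
      simp [cumFrom]
    · rw [if_neg h, if_neg h]
      rw [pvSearchB_shift a b rest off (List.range rest.length)
            (fun i hi => List.mem_range.mp hi)]
      exact ih (off - (b - a + 1))

-- ===== VERDICT (by name: the statement is the Claim_ definition above) =====
theorem map_cds_offset_to_tx_coord_py_spec : Claim_equal_map_cds_offset_to_tx_coord_py := by
  intro segs off _ _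
  unfold Spec_map_cds_offset_to_tx_coord_py map_cds_offset_to_tx_coord_py map_cds_offset_to_tx_coord_py_alt
  rw [pvBuildCum_nil_eq, B_eq_A]
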